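-- pv_equiv track=rewrite | github.com/lokred-test/my_Learnings | problem_solving/frequencyx_of_strings.py | count_banana_occurrences
-- ===== SOURCE A (Python) =====
-- def count_banana_occurrences(s):
--     from collections import Counter
--     filtered_string=[]
--     for char in s:
--         if char in "BANANA":
--             filtered_string.append(char)
--     counts=Counter(filtered_string)      #we got count of char's from the testcase string
--     required_count=Counter("BANANA")
--     return min(counts[char]//required_count[char] for char in required_count)
-- ===== SOURCE B (Python) =====
-- def count_banana_occurrences(s):
--     # One manual pass tallying just the three letters, then greedily "spell"
--     # BANANA by repeated subtraction (no division, no min, no Counter).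
--     b = a = n = 0
--     for ch in s:
--         if ch == 'B':
--             b += 1
--         elif ch == 'A':
--             a += 1
--         elif ch == 'N':
--             n += 1
--     k = 0
--     while b >= 1 and a >= 3 and n >= 2:
--         b -= 1
--         a -= 3
--         n -= 2
--         k += 1
--     return k
-- ===== Notes on version B (the rewrite author's own statement) =====
-- stated objective: alternative
-- what changed: Replaces the filter-list + two Counter tables + min-of-floor-divisions with a single explicit three-accumulator pass and a greedy repeated-subtraction loop that spells out BANANAs one at a time (no division, no min, no auxiliary container).
import Mathlib
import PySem

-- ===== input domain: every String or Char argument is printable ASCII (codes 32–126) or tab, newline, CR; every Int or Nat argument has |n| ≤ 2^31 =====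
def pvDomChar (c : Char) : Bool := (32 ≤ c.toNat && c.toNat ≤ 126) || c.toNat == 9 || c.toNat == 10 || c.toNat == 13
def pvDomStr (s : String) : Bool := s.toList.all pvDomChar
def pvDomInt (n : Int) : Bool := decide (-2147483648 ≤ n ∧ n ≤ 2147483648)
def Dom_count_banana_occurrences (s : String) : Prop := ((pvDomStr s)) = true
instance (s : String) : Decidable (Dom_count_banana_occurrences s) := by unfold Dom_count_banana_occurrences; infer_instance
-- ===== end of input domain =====

-- B replaces A's filter list + two Counter tables + min-of-floor-divisions with one
-- explicit three-accumulator pass and a greedy repeated-subtraction loop; same O(n) cost.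

-- ===== PORT A =====
def count_banana_occurrences (s : String) : Int :=
  let filtered : List Char :=
    s.toList.foldl (fun acc c => if PySem.Chars.isIn [c] "BANANA".toList then acc ++ [c] else acc) []
  let counts : PySem.Dict Char Int := PySem.Dict.counter filtered
  let required : PySem.Dict Char Int := PySem.Dict.counter "BANANA".toList
  -- min over the generator 'counts[char] // required_count[char] for char in required_count'
  -- (the key list of Counter("BANANA") is never empty, so Python's min always returns; .getD 0 is unreachable)
  (PySem.List.min? (required.keys.map
      (fun c => PySem.Int.floordiv (counts.getD c 0) (required.getD c 0))) (fun x => x)).getD 0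

-- ===== PORT B =====
-- the 'while b >= 1 and a >= 3 and n >= 2' loop of Source B, counting iterations in k
def pvSpend (b a n : Nat) : Nat :=
  if 1 ≤ b ∧ 3 ≤ a ∧ 2 ≤ n then pvSpend (b - 1) (a - 3) (n - 2) + 1 else 0
termination_by b
decreasing_by omega

def count_banana_occurrences_alt (s : String) : Int :=
  let t := s.toList.foldl
    (fun (t : Nat × Nat × Nat) c =>
      if c = 'B' then (t.1 + 1, t.2.1, t.2.2)
      else if c = 'A' then (t.1, t.2.1 + 1, t.2.2)
      else if c = 'N' then (t.1, t.2.1, t.2.2 + 1)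
      else t) (0, 0, 0)
  (pvSpend t.1 t.2.1 t.2.2 : Int)

-- ===== PRECONDITION & SPEC =====
def Spec_count_banana_occurrences (s : String) (out : Int) : Prop := out = count_banana_occurrences_alt s
instance (s : String) (out : Int) : Decidable (Spec_count_banana_occurrences s out) := by unfold Spec_count_banana_occurrences; infer_instance

-- ===== CLAIM (what is proved, stated in full; the proofs are below) =====
def Claim_equal_count_banana_occurrences : Prop := ∀ (s : String), Dom_count_banana_occurrences s → Spec_count_banana_occurrences s (count_banana_occurrences s)

-- ===== LEMMAS AND PROOFS =====

-- the greedy subtraction loop computes min(b, a//3, n//2)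
theorem pvSpend_eq (b a n : Nat) : pvSpend b a n = min b (min (a / 3) (n / 2)) := by
  fun_induction pvSpend b a n with
  | case1 b a n h ih => rw [ih]; omega
  | case2 b a n h => omega

-- B's single pass tallies exactly the three letter counts
theorem tally_eq (cs : List Char) :
    cs.foldl (fun (t : Nat × Nat × Nat) c =>
      if c = 'B' then (t.1 + 1, t.2.1, t.2.2)
      else if c = 'A' then (t.1, t.2.1 + 1, t.2.2)
      else if c = 'N' then (t.1, t.2.1, t.2.2 + 1)
      else t) (0, 0, 0) = (cs.count 'B', cs.count 'A', cs.count 'N') := by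
  suffices h : ∀ t : Nat × Nat × Nat,
      cs.foldl (fun (t : Nat × Nat × Nat) c =>
        if c = 'B' then (t.1 + 1, t.2.1, t.2.2)
        else if c = 'A' then (t.1, t.2.1 + 1, t.2.2)
        else if c = 'N' then (t.1, t.2.1, t.2.2 + 1)
        else t) t = (t.1 + cs.count 'B', t.2.1 + cs.count 'A', t.2.2 + cs.count 'N') by
    simpa using h (0, 0, 0)
  induction cs with
  | nil => intro t; simp
  | cons c cs ih =>
    intro t
    by_cases hB : c = 'B'
    · subst hB; simp [List.foldl_cons, ih]; omega
    · by_cases hA : c = 'A'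
      · subst hA; simp [List.foldl_cons, ih, hB]; omega
      · by_cases hN : c = 'N'
        · subst hN; simp [List.foldl_cons, ih, hB, hA]; omega
        · simp [List.foldl_cons, ih, hB, hA, hN]

-- a char of "BANANA" survives A's filter with exactly its multiplicity in s
theorem filtered_count (cs : List Char) (c : Char)
    (hc : PySem.Chars.isIn [c] "BANANA".toList = true) :
    (cs.filter (fun x => PySem.Chars.isIn [x] "BANANA".toList)).count c = cs.count c := by
  have hc' : PySem.Chars.isIn [c] ['B','A','N','A','N','A'] = true := hc
  rw [List.count_filter]
  simp [hc']

-- ===== VERDICT (by name: the statement is the Claim_ definition above) =====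
theorem count_banana_occurrences_spec : Claim_equal_count_banana_occurrences := by
  intro s _
  unfold Spec_count_banana_occurrences count_banana_occurrences count_banana_occurrences_alt
  simp only [PySem.List.foldl_append_if_eq_filter, List.nil_append, tally_eq]
  have hreq : PySem.Dict.counter "BANANA".toList = PySem.Dict.mk [('B',1),('A',3),('N',2)] := by
    decide
  rw [hreq]
  have hkeys : (PySem.Dict.mk [('B',(1:Int)),('A',3),('N',2)]).keys = ['B','A','N'] := by decide
  rw [hkeys]
  simp only [List.map_cons, List.map_nil, PySem.List.min?_id_cons, List.foldl, Option.getD_some]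
  rw [PySem.Dict.getD_counter, PySem.Dict.getD_counter, PySem.Dict.getD_counter]
  rw [filtered_count s.toList 'B' (by decide),
      filtered_count s.toList 'A' (by decide),
      filtered_count s.toList 'N' (by decide)]
  have hB : (PySem.Dict.mk [('B',(1:Int)),('A',3),('N',2)]).getD 'B' 0 = 1 := by decide
  have hA : (PySem.Dict.mk [('B',(1:Int)),('A',3),('N',2)]).getD 'A' 0 = 3 := by decide
  have hN : (PySem.Dict.mk [('B',(1:Int)),('A',3),('N',2)]).getD 'N' 0 = 2 := by decide
  rw [hB, hA, hN, pvSpend_eq]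
  rw [show ((3:Int)) = ((3:Nat):Int) from rfl, show ((2:Int)) = ((2:Nat):Int) from rfl,
      show ((1:Int)) = ((1:Nat):Int) from rfl]
  rw [PySem.Int.floordiv_natCast, PySem.Int.floordiv_natCast, PySem.Int.floordiv_natCast]
  push_cast
  omega
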